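-- pv_equiv track=rewrite | github.com/ugbodagadave/Isabella | tools/sheets_manager.py | _canon_row
-- ===== SOURCE A (Python) =====
-- from typing import Dict, Any, List
--
-- def _canon_key(key: str) -> str:
-- 	return (key or "").strip().lower().replace(" ", "_").replace("-", "_")
--
-- def _canon_row(row: Dict[str, Any]) -> Dict[str, Any]:
-- 	mapped: Dict[str, Any] = {}
-- 	for k, v in (row or {}).items():
-- 		ck = _canon_key(str(k))
-- 		mapped[ck] = v
-- 	# Normalize common variants to expected keys
-- 	aliases = {
-- 		"date": "date",
-- 		"vendor": "vendor",
-- 		"amount": "amount",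
-- 		"category": "category",
-- 		"description": "description",
-- 		"receipt_link": "receipt_link",
-- 		"payment_method": "payment_method",
-- 		"receipt_number": "receipt_number",
-- 		"tax_amount": "tax_amount",
-- 		"location": "location",
-- 		"processed_date": "processed_date",
-- 		"confidence_score": "confidence_score",
-- 	}
-- 	canon: Dict[str, Any] = {}
-- 	for key, target in aliases.items():
-- 		if key in mapped:
-- 			canon[target] = mapped.get(key)
-- 	# Preserve originals too (for any additional fields)
-- 	for k, v in mapped.items():
-- 		if k not in canon:
-- 			canon[k] = v
-- 	return canon
-- ===== SOURCE B (Python) =====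
-- _ORDER = ["date", "vendor", "amount", "category", "description", "receipt_link",
--           "payment_method", "receipt_number", "tax_amount", "location",
--           "processed_date", "confidence_score"]
--
-- def _canon_key(key: str) -> str:
-- 	return (key or "").strip().lower().replace(" ", "_").replace("-", "_")
--
-- def _canon_row(row):
-- 	mapped = {}
-- 	for k, v in (row or {}).items():
-- 		mapped[_canon_key(str(k))] = v
-- 	rank = {key: i for i, key in enumerate(_ORDER)}
-- 	items = list(mapped.items())
-- 	n = len(items)
-- 	return dict(kv for _, kv in sorted(
-- 		enumerate(items),
-- 		key=lambda t: rank.get(t[1][0], len(_ORDER)) * (n + 1) + t[0]))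
-- ===== Notes on version B (the rewrite author's own statement) =====
-- stated objective: alternative
-- what changed: A's two filtering passes (alias-order pickup into canon, then append of leftover mapped items) are replaced by one stable priority sort of the canonicalized items, with unknown keys all mapped to the same maximal rank so stability keeps their insertion order.
import Mathlib
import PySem

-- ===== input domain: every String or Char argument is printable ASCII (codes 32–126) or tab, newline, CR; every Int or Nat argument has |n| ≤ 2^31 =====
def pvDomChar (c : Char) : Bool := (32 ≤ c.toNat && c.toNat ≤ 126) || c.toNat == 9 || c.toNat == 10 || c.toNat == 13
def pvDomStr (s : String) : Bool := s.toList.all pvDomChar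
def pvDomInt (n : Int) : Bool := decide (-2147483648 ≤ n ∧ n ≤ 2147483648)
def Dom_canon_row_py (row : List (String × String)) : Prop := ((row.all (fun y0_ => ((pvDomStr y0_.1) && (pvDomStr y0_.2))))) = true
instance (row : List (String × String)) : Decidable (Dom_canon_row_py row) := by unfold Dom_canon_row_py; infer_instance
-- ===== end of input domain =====

-- B replaces A's two filtering passes (alias-order pickup, then remainder append) by a single
-- stable priority sort of the canonicalized items; same output, alternative decomposition.

-- ===== PORT A =====
-- _canon_key (defined identically in both Python files, shared by both ports).
-- '(key or "")' is the identity on strings except that "" maps to "": transliterated as the if; str(k) on a str is k.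
def canonKey (key : String) : String :=
  PySem.Str.replace
    (PySem.Str.replace (PySem.Str.lower (PySem.Str.strip (if key == "" then "" else key))) " " "_")
    "-" "_"

-- the literal 'aliases' dict of A (keys distinct, so Dict.mk of the literal list is that dict)
def aliasesA : PySem.Dict String String :=
  PySem.Dict.mk [("date", "date"), ("vendor", "vendor"), ("amount", "amount"),
    ("category", "category"), ("description", "description"), ("receipt_link", "receipt_link"),
    ("payment_method", "payment_method"), ("receipt_number", "receipt_number"),
    ("tax_amount", "tax_amount"), ("location", "location"),
    ("processed_date", "processed_date"), ("confidence_score", "confidence_score")]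

def canon_row_py (row : List (String × String)) : List (String × String) :=
  -- the 'row' parameter is a Python dict given as an association list; realize it as a Dict
  let rowD := row.foldl (fun d kv => d.insert kv.1 kv.2) PySem.Dict.empty
  let mapped := rowD.items.foldl (fun d kv => d.insert (canonKey kv.1) kv.2) PySem.Dict.empty
  let canon := aliasesA.items.foldl
    (fun c p => if mapped.contains p.1 then c.insert p.2 (mapped.getD p.1 "") else c)
    PySem.Dict.empty
  let canon := mapped.items.foldl
    (fun c kv => if c.contains kv.1 then c else c.insert kv.1 kv.2) canon
  canon.items

-- ===== PORT B =====
-- _ORDER of Source B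
def orderKeys : List String :=
  ["date", "vendor", "amount", "category", "description", "receipt_link",
   "payment_method", "receipt_number", "tax_amount", "location",
   "processed_date", "confidence_score"]

def canon_row_py_alt (row : List (String × String)) : List (String × String) :=
  let rowD := row.foldl (fun d kv => d.insert kv.1 kv.2) PySem.Dict.empty
  let mapped := rowD.items.foldl (fun d kv => d.insert (canonKey kv.1) kv.2) PySem.Dict.empty
  let rank := (PySem.List.enumerate orderKeys).foldl
    (fun d p => d.insert p.2 p.1) (PySem.Dict.empty : PySem.Dict String Int)
  let items := mapped.items
  let n := PySem.List.len items
  (PySem.Dict.ofList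
    ((PySem.List.sorted (PySem.List.enumerate items)
        (fun t => rank.getD t.2.1 (PySem.List.len orderKeys) * (n + 1) + t.1) false).map
      (fun t => t.2))).items

-- ===== PRECONDITION & SPEC =====
def Spec_canon_row_py (row : List (String × String)) (out : List (String × String)) : Prop := out = canon_row_py_alt row
instance (row : List (String × String)) (out : List (String × String)) : Decidable (Spec_canon_row_py row out) := by unfold Spec_canon_row_py; infer_instance

-- ===== CLAIM (what is proved, stated in full; the proofs are below) =====
def Claim_equal_canon_row_py : Prop := ∀ (row : List (String × String)), Dom_canon_row_py row → Spec_canon_row_py row (canon_row_py row)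

-- ===== LEMMAS AND PROOFS =====

-- B's rank dict as a closed term (definitionally the term appearing in canon_row_py_alt)
def rankDict : PySem.Dict String Int :=
  (PySem.List.enumerate orderKeys).foldl (fun d p => d.insert p.2 p.1) PySem.Dict.empty

lemma rank_lt_twelve : ∀ a ∈ orderKeys, 0 ≤ rankDict.getD a 12 ∧ rankDict.getD a 12 < 12 := by
  decide

lemma rank_pairwise :
    orderKeys.Pairwise (fun a b => rankDict.getD a 12 < rankDict.getD b 12) := by decide

lemma rank_of_not_mem (k : String) (hk : k ∉ orderKeys) : rankDict.getD k 12 = 12 := by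
  simp only [orderKeys, List.mem_cons, not_or] at hk
  obtain ⟨h1, h2, h3, h4, h5, h6, h7, h8, h9, h10, h11, h12, -⟩ := hk
  simp [show rankDict = PySem.Dict.mk [("date", (0 : Int)), ("vendor", 1), ("amount", 2),
      ("category", 3), ("description", 4), ("receipt_link", 5), ("payment_method", 6),
      ("receipt_number", 7), ("tax_amount", 8), ("location", 9), ("processed_date", 10),
      ("confidence_score", 11)] from rfl,
    PySem.Dict.getD_eq_get?_getD, PySem.Dict.get?_mk_cons,
    Ne.symm h1, Ne.symm h2, Ne.symm h3, Ne.symm h4, Ne.symm h5, Ne.symm h6,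
    Ne.symm h7, Ne.symm h8, Ne.symm h9, Ne.symm h10, Ne.symm h11, Ne.symm h12,
    show PySem.Dict.mk ([] : List (String × Int)) = PySem.Dict.empty from rfl,
    PySem.Dict.get?_empty]

-- A's second loop: insert-if-absent over pairs with distinct keys appends exactly the new pairs
lemma foldl_insert_if_not_contains (ms : List (String × String)) (c : PySem.Dict String String)
    (h : (ms.map (fun kv => kv.1)).Nodup) :
    (ms.foldl (fun c kv => if c.contains kv.1 then c else c.insert kv.1 kv.2) c).items
      = c.items ++ ms.filter (fun kv => !(c.contains kv.1)) := by
  induction ms generalizing c with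
  | nil => simp
  | cons kv rest ih =>
    simp only [List.map_cons, List.nodup_cons, List.mem_map] at h
    obtain ⟨hk, hrest⟩ := h
    simp only [List.foldl_cons, List.filter_cons]
    by_cases hc : c.contains kv.1 = true
    · rw [if_pos hc, ih c hrest, hc]
      simp
    · rw [if_neg hc, ih _ hrest,
        PySem.Dict.items_insert_of_not_contains c kv.2 (Bool.eq_false_iff.2 hc ▸ rfl)]
      have hfc : rest.filter (fun x => !(c.insert kv.1 kv.2).contains x.1)
          = rest.filter (fun x => !c.contains x.1) := by
        apply List.filter_congr
        intro x hx
        have hne : ¬ x.1 = kv.1 := fun he => hk ⟨x, hx, he⟩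
        simp [PySem.Dict.contains_insert, hne]
      rw [hfc]
      have : (!c.contains kv.1) = true := by simp [Bool.eq_false_iff.2 hc]
      simp [this]

lemma flatMap_congr_mem {α β : Type} {L : List α} {f g : α → List β}
    (h : ∀ a ∈ L, f a = g a) : L.flatMap f = L.flatMap g := by
  induction L with
  | nil => rfl
  | cons a L ih =>
    simp only [List.flatMap_cons, h a (by simp), ih fun x hx => h x (by simp [hx])]

-- any list is a permutation of its key-groups (in the order of L) followed by the rest
lemma perm_groups {T : Type} (key : T → String) (xs : List T) (L : List String) (hL : L.Nodup) :
    ((L.flatMap fun a => xs.filter fun t => key t == a)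
      ++ xs.filter fun t => !(decide (key t ∈ L))).Perm xs := by
  induction L generalizing xs with
  | nil => simp
  | cons a L ih =>
    obtain ⟨ha, hL'⟩ := List.nodup_cons.1 hL
    have base := List.filter_append_perm (fun t => key t == a) xs
    set xs' := xs.filter (fun t => !(key t == a)) with hxs'
    have hgrp : (L.flatMap fun a' => xs.filter fun t => key t == a')
        = L.flatMap fun a' => xs'.filter fun t => key t == a' := by
      apply flatMap_congr_mem
      intro a' ha'
      rw [hxs', List.filter_filter]
      apply List.filter_congr
      intro t _
      by_cases he : key t = a'
      · have hna : ¬ a' = a := by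
          intro h2; exact ha (h2 ▸ ha')
        simp [he, hna]
      · simp [he]
    have hrest : xs.filter (fun t => !(decide (key t ∈ a :: L)))
        = xs'.filter (fun t => !(decide (key t ∈ L))) := by
      rw [hxs', List.filter_filter]
      apply List.filter_congr
      intro t _
      by_cases h1 : key t = a <;> by_cases h2 : key t ∈ L <;> simp [h1, h2]
    have step1 : ((a :: L).flatMap fun a' => xs.filter fun t => key t == a')
          ++ xs.filter (fun t => !(decide (key t ∈ a :: L)))
        = (xs.filter fun t => key t == a) ++
            (((L.flatMap fun a' => xs'.filter fun t => key t == a')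
              ++ xs'.filter fun t => !(decide (key t ∈ L)))) := by
      rw [List.flatMap_cons, hrest, List.append_assoc, hgrp]
    rw [step1]
    exact (((ih xs' hL').append_left _).trans base)

lemma filter_snd_enumerate (p : String × String → Bool) (xs : List (String × String)) (s : Int) :
    ((PySem.List.enumerate xs s).filter (fun t => p t.2)).map (fun t => t.2) = xs.filter p := by
  induction xs generalizing s with
  | nil => simp [PySem.List.enumerate_nil]
  | cons x xs ih =>
    rw [PySem.List.enumerate_cons]
    by_cases hx : p x = true <;> simp [hx, ih]

lemma filter_key_eq (M : PySem.Dict String String) (hnd : M.keys.Nodup) (a : String) :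
    M.items.filter (fun kv => kv.1 == a)
      = if M.contains a then [(a, M.getD a "")] else [] := by
  rw [PySem.Dict.items_eq_map_keys M hnd ""]
  rw [List.filter_map]
  have : ((fun kv : String × String => kv.1 == a) ∘ fun k => (k, M.getD k "")) = fun k => k == a := rfl
  rw [this, List.filter_beq]
  by_cases hc : M.contains a = true
  · have ha : a ∈ M.keys := (PySem.Dict.contains_iff_mem_keys M a).1 hc
    rw [List.count_eq_one_of_mem hnd ha]
    simp [hc]
  · have ha : a ∉ M.keys := fun h => hc ((PySem.Dict.contains_iff_mem_keys M a).2 h)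
    rw [List.count_eq_zero.2 ha]
    simp [hc]

lemma flatMap_if_singleton {α β : Type} (L : List α) (c : α → Bool) (g : α → β) :
    (L.flatMap fun a => if c a then [g a] else []) = (L.filter c).map g := by
  induction L with
  | nil => rfl
  | cons a L ih => by_cases h : c a = true <;> simp [h, ih]

-- the heart: A's two loops and B's priority sort compute the same list from the same 'mapped'
lemma core (M : PySem.Dict String String) (hnd : M.keys.Nodup) :
    (M.items.foldl (fun c kv => if c.contains kv.1 then c else c.insert kv.1 kv.2)
      (aliasesA.items.foldl
        (fun c p => if M.contains p.1 then c.insert p.2 (M.getD p.1 "") else c)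
        PySem.Dict.empty)).items
    = (PySem.Dict.ofList
        ((PySem.List.sorted (PySem.List.enumerate M.items)
            (fun t => rankDict.getD t.2.1 (PySem.List.len orderKeys)
                * (PySem.List.len M.items + 1) + t.1) false).map
          (fun t => t.2))).items := by
  have hndms : (M.items.map (fun kv => kv.1)).Nodup := hnd
  set ms := M.items with hms
  set L := orderKeys with hLdef
  -- ============ LHS (A) ============
  have halias : aliasesA.items = L.map (fun a => (a, a)) := rfl
  rw [halias, List.foldl_map]
  rw [PySem.List.foldl_if_eq_foldl_filter (fun a => M.contains a)
      (fun c a => c.insert a (M.getD a "")) L PySem.Dict.empty]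
  set canon1 := (L.filter fun a => M.contains a).foldl
      (fun c a => c.insert a (M.getD a "")) PySem.Dict.empty with hcanon1
  rw [foldl_insert_if_not_contains ms canon1 hndms]
  have hc1items : canon1.items = (L.filter fun a => M.contains a).map
      (fun a => (a, M.getD a "")) := by
    rw [hcanon1, PySem.Dict.items_foldl_insert_fresh _ (fun a => a) _ _
      (by intro a _; exact PySem.Dict.contains_empty a)
      (by simpa using (by decide : L.Nodup).filter _)]
    rfl
  have hQ : ms.filter (fun kv => !(canon1.contains kv.1))
      = ms.filter (fun kv => !(decide (kv.1 ∈ L))) := by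
    apply List.filter_congr
    intro kv hkv
    have hmem : M.contains kv.1 = true := by
      rw [PySem.Dict.contains_iff_mem_keys]
      exact List.mem_map.2 ⟨kv, hkv, rfl⟩
    rw [PySem.Dict.contains_eq_decide_mem_keys]
    have hkeys : canon1.keys = L.filter fun a => M.contains a := by
      show canon1.items.map (fun p => p.1) = _
      rw [hc1items, List.map_map]
      exact List.map_id _ ▸ rfl
    rw [hkeys]
    simp [List.mem_filter, hmem]
  rw [hQ, hc1items]
  -- ============ RHS (B) ============
  have hlen12 : PySem.List.len L = 12 := rfl
  set keyFn : Int × (String × String) → Int :=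
    fun t => rankDict.getD t.2.1 (PySem.List.len L) * (PySem.List.len ms + 1) + t.1 with hkeyFn
  set es := PySem.List.enumerate ms with hes
  set n : Int := (ms.length : Int) with hn
  have hlenms : PySem.List.len ms = n := PySem.List.len_eq ms
  have hbounds : ∀ t ∈ es, 0 ≤ t.1 ∧ t.1 < n := by
    intro t ht
    rw [hes] at ht
    obtain ⟨k, hk, rfl⟩ := (PySem.List.mem_enumerate_iff ms 0 t).1 ht
    dsimp only
    rw [hn]
    constructor <;> omega
  have hrank_of_group : ∀ (a : String) (t : Int × (String × String)),
      t ∈ es.filter (fun t => t.2.1 == a) → t.2.1 = a := by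
    intro a t ht
    simpa using (List.mem_filter.1 ht).2
  set ys := ((L.flatMap fun a => es.filter fun t => t.2.1 == a)
      ++ es.filter fun t => !(decide (t.2.1 ∈ L))) with hys
  have hperm : ys.Perm es := perm_groups (fun t => t.2.1) es L (by decide)
  have hpairfst : es.Pairwise (fun p q => p.1 < q.1) := PySem.List.pairwise_lt_enumerate ms 0
  have hpair : ys.Pairwise (fun x y => keyFn x < keyFn y) := by
    rw [hys, List.pairwise_append]
    refine ⟨?_, ?_, ?_⟩
    · -- alias groups, in alias order
      rw [List.flatMap_def, List.pairwise_flatten]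
      constructor
      · intro l hl
        obtain ⟨a, ha, rfl⟩ := List.mem_map.1 hl
        refine (List.Pairwise.sublist List.filter_sublist hpairfst).imp_of_mem ?_
        intro x y hx hy hlt
        have hxa := hrank_of_group a x hx
        have hya := hrank_of_group a y hy
        rw [hkeyFn]
        simp only [hxa, hya]
        linarith [hlt]
      · rw [List.pairwise_map]
        refine rank_pairwise.imp_of_mem ?_
        intro a b ha hb hr x hx y hy
        have hxa := hrank_of_group a x hx
        have hyb := hrank_of_group b y hy
        have hbx := hbounds x (List.mem_of_mem_filter hx)
        have hby := hbounds y (List.mem_of_mem_filter hy)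
        rw [hkeyFn]
        simp only [hxa, hyb, hlen12, hlenms]
        have h1 : (rankDict.getD a 12 + 1) * (n + 1) ≤ rankDict.getD b 12 * (n + 1) :=
          mul_le_mul_of_nonneg_right (by omega) (by omega)
        nlinarith [h1, hbx.1, hbx.2, hby.1]
    · -- unknown keys, in original order
      refine (List.Pairwise.sublist List.filter_sublist hpairfst).imp_of_mem ?_
      intro x y hx hy hlt
      have hxr : rankDict.getD x.2.1 12 = 12 :=
        rank_of_not_mem _ (by simpa using (List.mem_filter.1 hx).2)
      have hyr : rankDict.getD y.2.1 12 = 12 :=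
        rank_of_not_mem _ (by simpa using (List.mem_filter.1 hy).2)
      rw [hkeyFn]
      simp only [hlen12, hlenms, hxr, hyr]
      omega
    · -- every alias-keyed item sorts before every unknown-keyed item
      intro x hx y hy
      obtain ⟨a, ha, hxin⟩ := List.mem_flatMap.1 hx
      have hxa := hrank_of_group a x hxin
      have hxb := hbounds x (List.mem_of_mem_filter hxin)
      have hyb := hbounds y (List.mem_of_mem_filter hy)
      have hyr : rankDict.getD y.2.1 12 = 12 :=
        rank_of_not_mem _ (by simpa using (List.mem_filter.1 hy).2)
      have hra := rank_lt_twelve a ha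
      rw [hkeyFn]
      simp only [hxa, hyr, hlen12, hlenms]
      have h1 : (rankDict.getD a 12 + 1) * (n + 1) ≤ 12 * (n + 1) :=
        mul_le_mul_of_nonneg_right (by omega) (by omega)
      nlinarith [h1, hxb.1, hxb.2, hyb.1]
  have hsorted : PySem.List.sorted es keyFn false = ys :=
    PySem.List.sorted_eq_of_perm_of_pairwise_lt es ys keyFn hperm hpair
  rw [hsorted]
  have hysnd : (ys.map (fun t => t.2)).Perm ms := by
    have := hperm.map (fun t : Int × (String × String) => t.2)
    rwa [hes, PySem.List.map_snd_enumerate] at this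
  have hndys : ((ys.map fun t => t.2).map (fun p => p.1)).Nodup :=
    ((hysnd.map (fun p => p.1)).nodup_iff).2 hndms
  rw [show PySem.Dict.ofList (ys.map (fun t => t.2))
      = (ys.map (fun t => t.2)).foldl (fun d p => d.insert p.1 p.2) PySem.Dict.empty from rfl]
  rw [PySem.Dict.items_foldl_insert_fresh (ys.map fun t => t.2)
      (fun p => p.1) (fun p => p.2) PySem.Dict.empty
      (by intro a _; exact PySem.Dict.contains_empty a.1) hndys]
  simp only [show (PySem.Dict.empty : PySem.Dict String String).items = [] from rfl,
    List.nil_append]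
  rw [hys, List.map_append, List.map_flatMap]
  have hgrp : (L.flatMap fun a => (es.filter fun t => t.2.1 == a).map fun t => t.2)
      = (L.filter fun a => M.contains a).map (fun a => (a, M.getD a "")) := by
    rw [flatMap_congr_mem (g := fun a => if M.contains a then [(a, M.getD a "")] else []) ?_]
    · exact flatMap_if_singleton L (fun a => M.contains a) (fun a => (a, M.getD a ""))
    · intro a _
      rw [hes, filter_snd_enumerate (fun kv => kv.1 == a) ms 0, hms, filter_key_eq M hnd a]
  have hrest : (es.filter fun t => !(decide (t.2.1 ∈ L))).map (fun t => t.2)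
      = ms.filter fun kv => !(decide (kv.1 ∈ L)) := by
    rw [hes]
    exact filter_snd_enumerate (fun kv => !(decide (kv.1 ∈ L))) ms 0
  rw [hgrp, hrest]
  simp

lemma main_eq (row : List (String × String)) : canon_row_py row = canon_row_py_alt row := by
  unfold canon_row_py canon_row_py_alt
  exact core _ (PySem.Dict.nodup_keys_foldl_insert_key _ _ _ _ PySem.Dict.nodup_keys_empty)

-- ===== VERDICT (by name: the statement is the Claim_ definition above) =====
theorem canon_row_py_spec : Claim_equal_canon_row_py := by
  intro row _
  unfold Spec_canon_row_py
  exact main_eq row
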